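-- pv_equiv track=rewrite | github.com/JeroenBos/TF | prime_defactorization.py | skip_first_and_last
-- ===== SOURCE A (Python) =====
-- def skip_first_and_last(seq):
--     first = True
--     second = True
--     previous = None
--     for elem in seq:
--         if second:
--             if first:
--                 first = False
--             else:
--                 second = False
--         else:
--             yield previous
--         previous = elem
-- ===== SOURCE B (Python) =====
-- def skip_first_and_last(seq):
--     items = list(seq)
--     for x in items[1:-1]:
--         yield x
-- ===== Notes on version B (the rewrite author's own statement) =====
-- stated objective: simpler
-- what changed: B materializes the sequence into a list and yields the slice items[1:-1], replacing A's streaming one-element-delay with a 'previous' cell and two boolean flags.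
import Mathlib
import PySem

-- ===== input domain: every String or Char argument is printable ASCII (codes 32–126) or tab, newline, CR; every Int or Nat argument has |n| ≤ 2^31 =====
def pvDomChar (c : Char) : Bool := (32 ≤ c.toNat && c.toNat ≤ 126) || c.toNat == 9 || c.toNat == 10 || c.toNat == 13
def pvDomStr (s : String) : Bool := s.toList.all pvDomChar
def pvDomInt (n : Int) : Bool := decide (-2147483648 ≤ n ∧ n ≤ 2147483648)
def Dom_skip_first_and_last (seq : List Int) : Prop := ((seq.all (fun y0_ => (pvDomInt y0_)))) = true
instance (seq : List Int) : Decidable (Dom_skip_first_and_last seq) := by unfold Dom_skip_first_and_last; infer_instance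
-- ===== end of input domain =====

-- B replaces A's streaming previous-element-plus-two-flags loop with materialize-then-slice items[1:-1] (objective: simpler); same values everywhere.
-- ===== PORT A =====
-- loop of A: state = (first, second, previous); yields 'previous' once both flags are cleared
def skipA_go (first second : Bool) (prev : Option Int) : List Int → List Int
  | [] => []
  | e :: rest =>
    if second then
      if first then skipA_go false second (some e) rest
      else skipA_go first false (some e) rest
    else prev.toList ++ skipA_go first second (some e) rest

def skip_first_and_last (seq : List Int) : List Int := skipA_go true true none seq

-- ===== PORT B =====
-- B: materialize, then yield the slice items[1:-1]
def skip_first_and_last_alt (seq : List Int) : List Int :=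
  let items := seq
  PySem.List.slice items (some 1) (some (-1))

-- ===== PRECONDITION & SPEC =====
def Spec_skip_first_and_last (seq : List Int) (out : List Int) : Prop := out = skip_first_and_last_alt seq
instance (seq : List Int) (out : List Int) : Decidable (Spec_skip_first_and_last seq out) := by unfold Spec_skip_first_and_last; infer_instance

-- ===== CLAIM (what is proved, stated in full; the proofs are below) =====
def Claim_equal_skip_first_and_last : Prop := ∀ (seq : List Int), Dom_skip_first_and_last seq → Spec_skip_first_and_last seq (skip_first_and_last seq)

-- ===== LEMMAS AND PROOFS =====

-- ===== VERDICT (by name: the statement is the Claim_ definition above) =====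
-- once both flags are cleared, A's loop emits 'prev' then each element but the last
theorem skipA_go_ff (p : Int) (l : List Int) :
    skipA_go false false (some p) l = (p :: l).dropLast := by
  induction l generalizing p with
  | nil => simp [skipA_go]
  | cons e rest ih => simp [skipA_go, ih e]

theorem slice_one_neg_one (l : List Int) :
    PySem.List.slice l (some 1) (some (-1)) = l.tail.dropLast := by
  simp [PySem.List.slice]
  cases l with
  | nil => simp
  | cons a t => simp [List.dropLast_eq_take]

theorem skip_first_and_last_spec : Claim_equal_skip_first_and_last := by
  intro seq _
  unfold Spec_skip_first_and_last skip_first_and_last skip_first_and_last_alt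
  rw [slice_one_neg_one]
  match seq with
  | [] => rfl
  | [a] => rfl
  | a :: b :: rest => simp [skipA_go, skipA_go_ff]
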